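-- pv_equiv track=rewrite | github.com/MaurizioFD/recsys-challenge-2020-twitter | Utils/Data/Features/Generated/EngagerFeature/EngagerKnowsHashtag.py | find_similarity_and_update
-- ===== SOURCE A (Python) =====
-- def find_similarity_and_update(engager_id, hashtag_arr, prev_hashtags_dictionary: dict,
--                                already_seen_users_set: set, is_positive_engagement: bool):
--     # if there is no hashtag in the current tweet
--     if hashtag_arr is None:
--         return 0
--
--     # check if engager_id was already seen
--     if engager_id in already_seen_users_set:
--         # then, we retrieve the list of its previously engaged tweets
--         prev_hashtags_set = prev_hashtags_dictionary[engager_id]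
--
--         # drop duplicates
--         curr_hashtags_set = set(hashtag_arr)
--
--         # count how many hashtag the user 'engager_id' has already seen
--         sim = 0
--         # iterate over the array
--         # update the prev_hashtags_set if positive engagement
--
--         if is_positive_engagement:
--             for curr_hashtag in curr_hashtags_set:
--                 if curr_hashtag in prev_hashtags_set:
--                     sim += 1
--                 else:  # UPDATE only if it wasn't present
--                     prev_hashtags_dictionary[engager_id].add(curr_hashtag)
--         else:         # NO UPDATE
--             for curr_hashtag in curr_hashtags_set:
--                 if curr_hashtag in prev_hashtags_set:
--                     sim += 1
--
--     else:
--         # if the user was never seen, the similarity is 0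
--         sim = 0
--         # update only if positive
--         if is_positive_engagement:
--             # update the already seen set
--             already_seen_users_set.add(engager_id)
--             # add the hashtags to the dictionary
--             prev_hashtags_dictionary[engager_id] = set(hashtag_arr)
--
--     return sim
-- ===== SOURCE B (Python) =====
-- def find_similarity_and_update(engager_id, hashtag_arr, prev_hashtags_dictionary: dict,
--                                already_seen_users_set: set, is_positive_engagement: bool):
--     if hashtag_arr is None:
--         return 0
--     if engager_id not in already_seen_users_set:
--         if is_positive_engagement:
--             already_seen_users_set.add(engager_id)
--             prev_hashtags_dictionary[engager_id] = set(hashtag_arr)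
--         return 0
--     prev = prev_hashtags_dictionary[engager_id]
--     # count shared hashtags by sorting both sides and merging with two pointers
--     cs = sorted(set(hashtag_arr))
--     ps = sorted(prev)
--     i = j = sim = 0
--     while i < len(cs) and j < len(ps):
--         if cs[i] == ps[j]:
--             sim += 1
--             i += 1
--             j += 1
--         elif cs[i] < ps[j]:
--             i += 1
--         else:
--             j += 1
--     if is_positive_engagement:
--         prev.update(hashtag_arr)
--     return sim
-- ===== Notes on version B (the rewrite author's own statement) =====
-- stated objective: alternative
-- what changed: Replaces A's hash-membership counting loop by a sort-then-merge algorithm: both hashtag collections are sorted and a two-pointer merge scan counts the common elements; the positive-engagement update becomes one in-place set.update of the stored set, and the unseen-user case is an early return.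
import Mathlib
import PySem

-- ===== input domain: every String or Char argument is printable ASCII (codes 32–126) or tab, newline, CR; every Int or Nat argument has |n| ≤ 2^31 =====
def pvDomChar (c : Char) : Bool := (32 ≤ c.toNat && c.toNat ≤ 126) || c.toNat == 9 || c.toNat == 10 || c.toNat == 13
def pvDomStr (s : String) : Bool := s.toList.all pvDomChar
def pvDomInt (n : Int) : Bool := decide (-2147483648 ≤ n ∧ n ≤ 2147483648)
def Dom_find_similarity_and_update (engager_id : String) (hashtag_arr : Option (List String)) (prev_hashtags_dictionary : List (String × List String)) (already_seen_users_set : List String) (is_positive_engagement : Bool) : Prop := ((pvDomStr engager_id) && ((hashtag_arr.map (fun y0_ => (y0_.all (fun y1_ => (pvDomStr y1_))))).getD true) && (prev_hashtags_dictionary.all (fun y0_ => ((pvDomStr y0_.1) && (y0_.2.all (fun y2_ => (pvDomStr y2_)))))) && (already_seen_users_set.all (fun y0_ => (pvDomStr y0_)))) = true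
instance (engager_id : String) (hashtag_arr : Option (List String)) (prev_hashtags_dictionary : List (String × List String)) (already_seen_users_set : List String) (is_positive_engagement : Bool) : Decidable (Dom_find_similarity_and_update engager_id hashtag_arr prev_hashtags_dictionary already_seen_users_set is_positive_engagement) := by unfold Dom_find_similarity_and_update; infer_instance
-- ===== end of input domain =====

-- B replaces A's hash-membership counting loop by sort-then-merge: both hashtag collections
-- are sorted and a two-pointer merge scan counts the common elements; objective: alternative.
-- Both versions mutate their dict/set arguments identically; the equivalence proved here is
-- about the RETURN value only.

-- ===== PORT A =====
def find_similarity_and_update (engager_id : String) (hashtag_arr : Option (List String)) (prev_hashtags_dictionary : List (String × List String)) (already_seen_users_set : List String) (is_positive_engagement : Bool) : Int :=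
  match hashtag_arr with
  | none => 0
  | some arr =>
    if PySem.Set.contains already_seen_users_set engager_id then
      match PySem.Dict.get? (PySem.Dict.mk prev_hashtags_dictionary) engager_id with
      | none => 0   -- KeyError in Python; excluded by Pre_
      | some prev_hashtags_set =>
        let curr_hashtags_set : PySem.Set String := PySem.Set.ofList arr
        if is_positive_engagement then
          -- loop with the aliased set being extended on each miss
          (curr_hashtags_set.foldl
            (fun (st : Int × PySem.Set String) curr_hashtag =>
              if PySem.Set.contains st.2 curr_hashtag then (st.1 + 1, st.2)
              else (st.1, PySem.Set.add st.2 curr_hashtag))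
            (0, prev_hashtags_set)).1
        else
          curr_hashtags_set.foldl
            (fun (sim : Int) curr_hashtag =>
              if PySem.Set.contains prev_hashtags_set curr_hashtag then sim + 1 else sim) 0
    else
      0

-- ===== PORT B =====
-- the two-pointer merge loop of Source B, written as recursion on the two sorted lists
def pvMergeCount : List String → List String → Int
  | [], _ => 0
  | _ :: _, [] => 0
  | x :: xs, y :: ys =>
    if x = y then pvMergeCount xs ys + 1
    else if x < y then pvMergeCount xs (y :: ys)
    else pvMergeCount (x :: xs) ys
termination_by a b => a.length + b.length
decreasing_by all_goals (simp; try omega)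

def find_similarity_and_update_alt (engager_id : String) (hashtag_arr : Option (List String)) (prev_hashtags_dictionary : List (String × List String)) (already_seen_users_set : List String) (is_positive_engagement : Bool) : Int :=
  match hashtag_arr with
  | none => 0
  | some arr =>
    if ¬ PySem.Set.contains already_seen_users_set engager_id then 0
    else
      match PySem.Dict.get? (PySem.Dict.mk prev_hashtags_dictionary) engager_id with
      | none => 0   -- KeyError in Python; excluded by Pre_
      | some prev =>
        let cs := PySem.List.sorted (PySem.Set.ofList arr) (fun x => x) false
        let ps := PySem.List.sorted prev (fun x => x) false
        pvMergeCount cs ps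

-- ===== PRECONDITION & SPEC =====
-- Pre_ excludes exactly the inputs where Python A (and B) raise KeyError: hashtag_arr is
-- present and engager_id is already seen but absent from prev_hashtags_dictionary.
def Pre_find_similarity_and_update (engager_id : String) (hashtag_arr : Option (List String)) (prev_hashtags_dictionary : List (String × List String)) (already_seen_users_set : List String) (is_positive_engagement : Bool) : Prop :=
  hashtag_arr ≠ none → engager_id ∈ already_seen_users_set → engager_id ∈ prev_hashtags_dictionary.map Prod.fst
instance (engager_id : String) (hashtag_arr : Option (List String)) (prev_hashtags_dictionary : List (String × List String)) (already_seen_users_set : List String) (is_positive_engagement : Bool) : Decidable (Pre_find_similarity_and_update engager_id hashtag_arr prev_hashtags_dictionary already_seen_users_set is_positive_engagement) := by unfold Pre_find_similarity_and_update; infer_instance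

def pvWitness_find_similarity_and_update : String × Option (List String) × (List (String × List String)) × List String × Bool :=
  ("u", some ["h", "k"], [("u", ["h", "x"])], ["u"], true)

def Spec_find_similarity_and_update (engager_id : String) (hashtag_arr : Option (List String)) (prev_hashtags_dictionary : List (String × List String)) (already_seen_users_set : List String) (is_positive_engagement : Bool) (out : Int) : Prop := out = find_similarity_and_update_alt engager_id hashtag_arr prev_hashtags_dictionary already_seen_users_set is_positive_engagement
instance (engager_id : String) (hashtag_arr : Option (List String)) (prev_hashtags_dictionary : List (String × List String)) (already_seen_users_set : List String) (is_positive_engagement : Bool) (out : Int) : Decidable (Spec_find_similarity_and_update engager_id hashtag_arr prev_hashtags_dictionary already_seen_users_set is_positive_engagement out) := by unfold Spec_find_similarity_and_update; infer_instance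

-- ===== CLAIM (what is proved, stated in full; the proofs are below) =====
def Claim_equal_find_similarity_and_update : Prop := ∀ (engager_id : String) (hashtag_arr : Option (List String)) (prev_hashtags_dictionary : List (String × List String)) (already_seen_users_set : List String) (is_positive_engagement : Bool), Dom_find_similarity_and_update engager_id hashtag_arr prev_hashtags_dictionary already_seen_users_set is_positive_engagement → Pre_find_similarity_and_update engager_id hashtag_arr prev_hashtags_dictionary already_seen_users_set is_positive_engagement → Spec_find_similarity_and_update engager_id hashtag_arr prev_hashtags_dictionary already_seen_users_set is_positive_engagement (find_similarity_and_update engager_id hashtag_arr prev_hashtags_dictionary already_seen_users_set is_positive_engagement)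

-- ===== LEMMAS AND PROOFS =====

-- A's negative branch: the counting loop computes a filter length.
theorem foldl_count_eq_filter_len (xs p : List String) (s : Int) :
    xs.foldl (fun (sim : Int) h => if PySem.Set.contains p h then sim + 1 else sim) s
      = s + (xs.filter (fun h => PySem.Set.contains p h)).length := by
  induction xs generalizing s with
  | nil => simp
  | cons x xs ih =>
    simp only [List.foldl_cons, List.filter_cons]
    by_cases hx : x ∈ p
    · have hc : PySem.Set.contains p x = true := (PySem.Set.contains_iff p x).mpr hx
      rw [if_pos hc, ih]
      simp only [hc, if_pos, List.length_cons]
      push_cast; omega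
    · have hc : PySem.Set.contains p x = false := by
        by_contra h
        exact hx ((PySem.Set.contains_iff p x).mp (by simpa using h))
      rw [hc]
      simp only [Bool.false_eq_true, if_false, ih]

-- A's positive branch: as long as the scanned elements are distinct, the aliased-set
-- extension never affects later membership tests, so it is the same filter length.
theorem foldl_pos_eq_filter_len (xs : List String) (hnd : xs.Nodup) :
    ∀ (p p0 : List String) (s : Int), (∀ x ∈ xs, (x ∈ p ↔ x ∈ p0)) →
    (xs.foldl
        (fun (st : Int × PySem.Set String) h =>
          if PySem.Set.contains st.2 h then (st.1 + 1, st.2)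
          else (st.1, PySem.Set.add st.2 h))
        (s, p)).1
      = s + (xs.filter (fun h => PySem.Set.contains p0 h)).length := by
  induction xs with
  | nil => intro p p0 s _; simp
  | cons x xs ih =>
    intro p p0 s hiff
    have hnd' : xs.Nodup := hnd.of_cons
    have hxnot : x ∉ xs := (List.nodup_cons.mp hnd).1
    have hx0 : (x ∈ p ↔ x ∈ p0) := hiff x (by simp)
    simp only [List.foldl_cons, List.filter_cons]
    by_cases hx : x ∈ p
    · have hcp : PySem.Set.contains p x = true := (PySem.Set.contains_iff p x).mpr hx
      have hcp0 : PySem.Set.contains p0 x = true := (PySem.Set.contains_iff p0 x).mpr (hx0.mp hx)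
      rw [if_pos hcp]
      have := ih hnd' p p0 (s + 1) (fun y hy => hiff y (by simp [hy]))
      simp only [this, hcp0]
      simp; omega
    · have hcp : ¬ PySem.Set.contains p x = true := fun h => hx ((PySem.Set.contains_iff p x).mp h)
      have hcp0 : ¬ PySem.Set.contains p0 x = true := fun h => hx (hx0.mpr ((PySem.Set.contains_iff p0 x).mp h))
      rw [if_neg hcp]
      have hiff' : ∀ y ∈ xs, (y ∈ PySem.Set.add p x ↔ y ∈ p0) := by
        intro y hy
        have hyx : y ≠ x := fun he => hxnot (he ▸ hy)
        rw [PySem.Set.mem_add]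
        constructor
        · rintro (h | h)
          · exact (hiff y (by simp [hy])).mp h
          · exact absurd h hyx
        · intro h; exact Or.inl ((hiff y (by simp [hy])).mpr h)
      have := ih hnd' (PySem.Set.add p x) p0 s hiff'
      simp only [this, hcp0]
      simp

-- B's merge loop on a strictly increasing left list and a weakly increasing right list
-- computes the same filter length.
theorem pvMergeCount_eq_filter_len (cs ps : List String)
    (hc : cs.Pairwise (· < ·)) (hp : ps.Pairwise (· ≤ ·)) :
    pvMergeCount cs ps = ((cs.filter (fun h => PySem.Set.contains ps h)).length : Int) := by
  induction cs, ps using pvMergeCount.induct with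
  | case1 ps => simp [pvMergeCount]
  | case2 x xs => simp [pvMergeCount, PySem.Set.contains]
  | case3 xs y ys ih =>
    have hxall : ∀ z ∈ xs, y < z := by
      intro z hz; exact (List.pairwise_cons.mp hc).1 z hz
    have hcontains : ∀ z ∈ xs, (PySem.Set.contains (y :: ys) z = PySem.Set.contains ys z) := by
      intro z hz
      have hzx : z ≠ y := fun he => absurd (he ▸ hxall z hz) (lt_irrefl z)
      by_cases hm : z ∈ ys
      · rw [(PySem.Set.contains_iff _ z).mpr (List.mem_cons_of_mem _ hm),
            (PySem.Set.contains_iff ys z).mpr hm]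
      · have h1 : z ∉ y :: ys := by
          intro h
          cases h with
          | head => exact hzx rfl
          | tail _ h => exact hm h
        have e1 : PySem.Set.contains (y :: ys) z = false := by
          cases hq : PySem.Set.contains (y :: ys) z with
          | false => rfl
          | true => exact absurd ((PySem.Set.contains_iff _ z).mp hq) h1
        have e2 : PySem.Set.contains ys z = false := by
          by_contra h; exact hm ((PySem.Set.contains_iff ys z).mp (by simpa using h))
        rw [e1, e2]
    have hcx : PySem.Set.contains (y :: ys) y = true :=
      (PySem.Set.contains_iff _ y).mpr (List.mem_cons_self)
    rw [pvMergeCount]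
    simp only [List.filter_cons, hcx, if_pos, List.length_cons]
    rw [ih hc.of_cons hp.of_cons, List.filter_congr hcontains]
    have he : (xs.filter (PySem.Set.contains ys)) = (xs.filter (fun h => PySem.Set.contains ys h)) := rfl
    rw [he]; push_cast; omega
  | case4 x xs y ys hne hlt ih =>
    -- x < y ≤ every element of y :: ys, so x is not in ps
    have hxnot : x ∉ y :: ys := by
      intro h
      cases h with
      | head => exact hne rfl
      | tail _ h =>
        have := (List.pairwise_cons.mp hp).1 x h
        exact absurd (lt_of_lt_of_le hlt this) (lt_irrefl x)
    have hcx : PySem.Set.contains (y :: ys) x = false := by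
      cases hq : PySem.Set.contains (y :: ys) x with
      | false => rfl
      | true => exact absurd ((PySem.Set.contains_iff _ x).mp hq) hxnot
    rw [pvMergeCount]
    simp only [if_neg hne, if_pos hlt, List.filter_cons, hcx]
    simp only [Bool.false_eq_true, if_false]
    exact ih hc.of_cons hp
  | case5 x xs y ys hne hnlt ih =>
    -- y < x ≤ every element of x :: xs, so dropping y changes no membership of x :: xs
    have hyx : y < x := lt_of_le_of_ne (le_of_not_gt hnlt) (fun he => hne he.symm)
    have hall : ∀ z ∈ x :: xs, y < z := by
      intro z hz
      cases hz with
      | head => exact hyx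
      | tail _ h => exact lt_trans hyx ((List.pairwise_cons.mp hc).1 z h)
    have hcontains : ∀ z ∈ x :: xs,
        (PySem.Set.contains (y :: ys) z = PySem.Set.contains ys z) := by
      intro z hz
      have hzy : z ≠ y := fun he => absurd (he ▸ hall z hz) (lt_irrefl y)
      by_cases hm : z ∈ ys
      · rw [(PySem.Set.contains_iff _ z).mpr (List.mem_cons_of_mem _ hm),
            (PySem.Set.contains_iff ys z).mpr hm]
      · have h1 : z ∉ y :: ys := by
          intro h
          cases h with
          | head => exact hzy rfl
          | tail _ h => exact hm h
        have e1 : PySem.Set.contains (y :: ys) z = false := by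
          cases hq : PySem.Set.contains (y :: ys) z with
          | false => rfl
          | true => exact absurd ((PySem.Set.contains_iff _ z).mp hq) h1
        have e2 : PySem.Set.contains ys z = false := by
          by_contra h; exact hm ((PySem.Set.contains_iff ys z).mp (by simpa using h))
        rw [e1, e2]
    rw [pvMergeCount]
    simp only [if_neg hne, if_neg hnlt]
    rw [ih hc hp.of_cons, List.filter_congr hcontains]

-- ===== VERDICT (by name: the statement is the Claim_ definition above) =====
theorem find_similarity_and_update_spec : Claim_equal_find_similarity_and_update := by
  intro eid arr d seen pos _ hpre
  unfold Spec_find_similarity_and_update find_similarity_and_update find_similarity_and_update_alt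
  cases arr with
  | none => rfl
  | some xs =>
    dsimp only
    by_cases hseen : PySem.Set.contains seen eid = true
    · rw [if_pos hseen, if_neg (by simp [(PySem.Set.contains_iff seen eid).mp hseen])]
      cases hget : PySem.Dict.get? (PySem.Dict.mk d) eid with
      | none => rfl
      | some prev =>
        dsimp only
        -- notation for the two sorted lists of B
        set cs := PySem.List.sorted (PySem.Set.ofList xs) (fun x => x) false with hcs
        set ps := PySem.List.sorted prev (fun x => x) false with hps
        have hperm : cs.Perm (PySem.Set.ofList xs) := PySem.List.sorted_perm _ _ _
        have hcsnd : cs.Nodup := hperm.symm.nodup (PySem.Set.nodup_ofList xs)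
        have hcslt : cs.Pairwise (· < ·) := by
          have h1 : cs.Pairwise (· ≤ ·) := by
            simpa using PySem.List.sorted_pairwise (PySem.Set.ofList xs) (fun x => x)
          have h2 : cs.Pairwise (· ≠ ·) := hcsnd
          exact (h1.and h2).imp (fun hab => lt_of_le_of_ne hab.1 hab.2)
        have hpsle : ps.Pairwise (· ≤ ·) := by
          simpa using PySem.List.sorted_pairwise prev (fun x => x)
        have hcontains : ∀ z ∈ cs, (PySem.Set.contains ps z = PySem.Set.contains prev z) := by
          intro z _
          by_cases hm : z ∈ prev
          · rw [(PySem.Set.contains_iff ps z).mpr ((PySem.List.mem_sorted prev (fun x => x) false z).mpr hm),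
                (PySem.Set.contains_iff prev z).mpr hm]
          · have h1 : z ∉ ps := fun h => hm ((PySem.List.mem_sorted prev (fun x => x) false z).mp h)
            have e1 : PySem.Set.contains ps z = false := by
              by_contra h; exact h1 ((PySem.Set.contains_iff ps z).mp (by simpa using h))
            have e2 : PySem.Set.contains prev z = false := by
              by_contra h; exact hm ((PySem.Set.contains_iff prev z).mp (by simpa using h))
            rw [e1, e2]
        have hB : pvMergeCount cs ps
            = (((PySem.Set.ofList xs).filter (fun h => PySem.Set.contains prev h)).length : Int) := by
          rw [pvMergeCount_eq_filter_len cs ps hcslt hpsle, List.filter_congr hcontains,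
              (hperm.filter _).length_eq]
        cases pos with
        | false =>
          simp only [Bool.false_eq_true, if_false]
          rw [foldl_count_eq_filter_len, hB]
          omega
        | true =>
          simp only [if_pos]
          rw [foldl_pos_eq_filter_len (PySem.Set.ofList xs) (PySem.Set.nodup_ofList xs)
            prev prev 0 (fun _ _ => Iff.rfl), hB]
          omega
    · rw [if_neg hseen, if_pos hseen]
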